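-- pv_equiv track=rewrite | github.com/kkaryl/AI6122-Product_Review_Data_Analysis_and_Processing | SourceCode/01 Dataset Analysis/03 Tokenization and Stemming/tokenizerandstemmer.py | generate_unique_count_xy
-- ===== SOURCE A (Python) =====
-- def generate_unique_count_xy(list_of_tokenlists):
--     """ """
--     unique_token_len = [len(set(tokenlist)) for tokenlist in list_of_tokenlists]
--     unique_token_count = {}
--
--     for tokenlen in unique_token_len:
--         if not tokenlen in unique_token_count:
--             unique_token_count[tokenlen] = 1
--         else:
--             unique_token_count[tokenlen] += 1
--
--     tuples = sorted(unique_token_count.items()) # sorted by key, return a list of tuples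
--     len_of_review, no_of_reviews = zip(*tuples) # unpack a list of pairs into two tuples
--
--     return len_of_review, no_of_reviews
-- ===== SOURCE B (Python) =====
-- def generate_unique_count_xy(list_of_tokenlists):
--     """ """
--     lens = sorted(len(set(tokenlist)) for tokenlist in list_of_tokenlists)
--     pairs = []
--     i = 0
--     n = len(lens)
--     while i < n:
--         j = i + 1
--         while j < n and lens[j] == lens[i]:
--             j += 1
--         pairs.append((lens[i], j - i))
--         i = j
--     len_of_review, no_of_reviews = zip(*pairs)
--     return len_of_review, no_of_reviews
-- ===== Notes on version B (the rewrite author's own statement) =====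
-- stated objective: alternative
-- what changed: B sorts the per-review unique-token counts and run-length-encodes the sorted list in one scan, replacing A's histogram dict and the separate sort of its items.
-- outside the precondition, e.g. on generate_unique_count_xy([]): A raises ValueError, B raises ValueError
import Mathlib
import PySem

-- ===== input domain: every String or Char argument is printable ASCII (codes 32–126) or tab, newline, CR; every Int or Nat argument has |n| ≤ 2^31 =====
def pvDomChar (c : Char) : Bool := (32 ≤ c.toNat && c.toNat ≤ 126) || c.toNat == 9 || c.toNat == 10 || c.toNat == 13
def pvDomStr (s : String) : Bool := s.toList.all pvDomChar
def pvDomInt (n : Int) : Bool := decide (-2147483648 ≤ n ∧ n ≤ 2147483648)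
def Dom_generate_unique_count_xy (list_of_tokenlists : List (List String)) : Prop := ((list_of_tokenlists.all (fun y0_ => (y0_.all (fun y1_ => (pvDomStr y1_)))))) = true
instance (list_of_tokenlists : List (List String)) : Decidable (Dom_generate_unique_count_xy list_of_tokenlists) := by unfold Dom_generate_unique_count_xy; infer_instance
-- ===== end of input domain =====

-- B replaces A's histogram dict + key-sort by sorting the unique-token counts once and
-- run-length-encoding the sorted list in a single scan (objective: alternative decomposition).
-- Both Pythons raise ValueError on an empty input list (zip(*[]) unpack), hence Pre_ below.

-- ===== PORT A =====
def generate_unique_count_xy (list_of_tokenlists : List (List String)) : List Int × List Int :=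
  -- unique_token_len = [len(set(tokenlist)) for tokenlist in list_of_tokenlists]
  let unique_token_len : List Int :=
    list_of_tokenlists.map (fun tokenlist => ((PySem.Set.ofList tokenlist).length : Int))
  -- for tokenlen in unique_token_len: if not tokenlen in d: d[tokenlen]=1 else: d[tokenlen]+=1
  let unique_token_count : PySem.Dict Int Int :=
    unique_token_len.foldl
      (fun d tokenlen =>
        if d.contains tokenlen = false then d.insert tokenlen 1
        else d.insert tokenlen (d.getD tokenlen 0 + 1))
      PySem.Dict.empty
  -- tuples = sorted(unique_token_count.items())   (tuple comparison = lexicographic)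
  let tuples := PySem.List.sorted2 unique_token_count.items Prod.fst Prod.snd
  -- len_of_review, no_of_reviews = zip(*tuples)   (nonempty under Pre_)
  (tuples.map Prod.fst, tuples.map Prod.snd)

-- ===== PORT B =====
-- the outer while over i with the inner run-scanning while over j, as structural recursion:
-- each step emits (lens[i], j - i) for the run starting at i and continues at j
def pvRuns : List Int → List (Int × Int)
  | [] => []
  | v :: rest =>
    (v, 1 + ((rest.takeWhile (fun x => x == v)).length : Int)) ::
      pvRuns (rest.dropWhile (fun x => x == v))
  termination_by s => s.length
  decreasing_by
    simpa using Nat.lt_succ_of_le (List.length_dropWhile_le _ _)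

def generate_unique_count_xy_alt (list_of_tokenlists : List (List String)) : List Int × List Int :=
  -- lens = sorted(len(set(tokenlist)) for tokenlist in list_of_tokenlists)
  let lens : List Int :=
    PySem.List.sorted (list_of_tokenlists.map
      (fun tokenlist => ((PySem.Set.ofList tokenlist).length : Int))) (fun x => x)
  -- run-length scan over the sorted list
  let pairs := pvRuns lens
  -- len_of_review, no_of_reviews = zip(*pairs)   (nonempty under Pre_)
  (pairs.map Prod.fst, pairs.map Prod.snd)

-- ===== PRECONDITION & SPEC =====
-- Pre_ excludes only the empty input list, on which both Pythons raise ValueError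
-- ("not enough values to unpack" from zip(*[])).
def Pre_generate_unique_count_xy (list_of_tokenlists : List (List String)) : Prop :=
  list_of_tokenlists ≠ []
instance (list_of_tokenlists : List (List String)) : Decidable (Pre_generate_unique_count_xy list_of_tokenlists) := by unfold Pre_generate_unique_count_xy; infer_instance

def pvWitness_generate_unique_count_xy : List (List String) := [["a", "b", "a"], ["c"]]

def Spec_generate_unique_count_xy (list_of_tokenlists : List (List String)) (out : List Int × List Int) : Prop := out = generate_unique_count_xy_alt list_of_tokenlists
instance (list_of_tokenlists : List (List String)) (out : List Int × List Int) : Decidable (Spec_generate_unique_count_xy list_of_tokenlists out) := by unfold Spec_generate_unique_count_xy; infer_instance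

-- ===== CLAIM (what is proved, stated in full; the proofs are below) =====
def Claim_equal_generate_unique_count_xy : Prop := ∀ (list_of_tokenlists : List (List String)), Dom_generate_unique_count_xy list_of_tokenlists → Pre_generate_unique_count_xy list_of_tokenlists → Spec_generate_unique_count_xy list_of_tokenlists (generate_unique_count_xy list_of_tokenlists)

-- ===== LEMMAS AND PROOFS =====

-- A's counting loop builds collections.Counter(lens)
theorem pvDictFold_eq_counter (lens : List Int) :
    lens.foldl
      (fun d tokenlen =>
        if d.contains tokenlen = false then d.insert tokenlen 1
        else d.insert tokenlen (d.getD tokenlen 0 + 1))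
      PySem.Dict.empty = PySem.Dict.counter lens := by
  rw [PySem.Dict.counter_eq_foldl]
  congr 1
  funext d k
  by_cases h : d.contains k = false
  · have h0 : d.getD k 0 = 0 := by
      rw [PySem.Dict.contains_eq_isSome_get?] at h
      simp only [Option.isSome_eq_false_iff, Option.isNone_iff_eq_none] at h
      simp [PySem.Dict.getD, h]
    simp [h, PySem.Dict.modify, h0]
  · simp [h, PySem.Dict.modify]

-- pushing a map through insertBy when g transports the order relation
theorem pvInsertBy_map (before : Int → Int → Bool) (before' : Int × Int → Int × Int → Bool)
    (g : Int → Int × Int) (hg : ∀ a b, before' (g a) (g b) = before a b)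
    (x : Int) (ys : List Int) :
    PySem.List.insertBy before' (g x) (ys.map g) = (PySem.List.insertBy before x ys).map g := by
  induction ys with
  | nil => simp [PySem.List.insertBy]
  | cons y ys ih =>
    simp only [List.map_cons, PySem.List.insertBy, hg]
    by_cases h : before x y
    · simp [h]
    · simp only [h, Bool.false_eq_true, ite_false, List.map_cons]
      rw [ih]

-- sorted2 of a mapped list (k, c k): lexicographic pair order collapses to < on the key
theorem pvSorted2_map (c : Int → Int) (l : List Int) :
    PySem.List.sorted2 (l.map (fun k => (k, c k))) Prod.fst Prod.snd
      = (PySem.List.sorted l (fun x => x)).map (fun k => (k, c k)) := by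
  rw [PySem.List.sorted_eq_foldl_insertBy]
  show (l.map (fun k => (k, c k))).foldl
      (fun acc x => PySem.List.insertBy
        (fun a b => decide (a.1 < b.1) || (!decide (b.1 < a.1) && decide (a.2 < b.2))) x acc) []
    = _
  have hg : ∀ a b : Int,
      (decide (a < b) || (!decide (b < a) && decide (c a < c b))) = decide (a < b) := by
    intro a b
    rcases lt_trichotomy a b with h | h | h
    · simp [h]
    · subst h; simp
    · simp [h, not_lt_of_gt h]
  have main : ∀ (l : List Int) (acc : List Int),
      (l.map (fun k => (k, c k))).foldl
        (fun acc x => PySem.List.insertBy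
          (fun a b => decide (a.1 < b.1) || (!decide (b.1 < a.1) && decide (a.2 < b.2))) x acc)
        (acc.map (fun k => (k, c k)))
      = (l.foldl (fun acc x => PySem.List.insertBy (fun a b => decide (a < b)) x acc) acc).map
          (fun k => (k, c k)) := by
    intro l
    induction l with
    | nil => intro acc; simp
    | cons x xs ih =>
      intro acc
      simp only [List.map_cons, List.foldl_cons]
      have hx : ((x, c x) : Int × Int) = (fun k => (k, c k)) x := rfl
      rw [hx, pvInsertBy_map (fun a b => decide (a < b))
        (fun p q => decide (p.1 < q.1) || (!decide (q.1 < p.1) && decide (p.2 < q.2)))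
        (fun k => (k, c k)) (fun a b => hg a b), ih]
  simpa using main l []

-- Set.ofList keeps first occurrences in order, hence is a sublist
theorem pvOfList_sublist (s : List Int) : (PySem.Set.ofList s).Sublist s := by
  induction s with
  | nil => simp [PySem.Set.ofList, PySem.Set.empty]
  | cons x xs ih =>
    rw [PySem.Set.ofList_cons]
    exact (List.cons_sublist_cons).mpr ((List.filter_sublist).trans ih)

-- run-length encoding of a weakly increasing list lists each distinct value with its count
theorem pvRuns_sorted (s : List Int) (hs : s.Pairwise (· ≤ ·)) :
    pvRuns s = (PySem.Set.ofList s).map (fun k => (k, (s.count k : Int))) := by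
  induction s using pvRuns.induct with
  | case1 => simp [pvRuns, PySem.Set.ofList, PySem.Set.empty]
  | case2 v rest ih =>
    set t := rest.takeWhile (fun x => x == v) with ht
    set d := rest.dropWhile (fun x => x == v) with hd
    have hrest : t ++ d = rest := List.takeWhile_append_dropWhile
    have htv : ∀ x ∈ t, x = v := by
      intro x hx
      simpa using List.mem_takeWhile_imp hx
    have hvle : ∀ x ∈ rest, v ≤ x := by
      intro x hx
      exact (List.pairwise_cons.mp hs).1 x hx
    have hdsub : d.Sublist rest := List.dropWhile_sublist _
    have hdpw : d.Pairwise (· ≤ ·) := ((List.pairwise_cons.mp hs).2).sublist hdsub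
    have hvd : v ∉ d := by
      intro hvmem
      cases hdcases : d with
      | nil => rw [hdcases] at hvmem; simp at hvmem
      | cons d0 d' =>
        have hhead : ¬ ((d0 == v) = true) := by
          have := List.head?_dropWhile_not (fun x => x == v) rest
          rw [← hd, hdcases] at this
          simpa using this
        have hd0ne : d0 ≠ v := by simpa using hhead
        have hd0mem : d0 ∈ rest := hdsub.mem (by rw [hdcases]; exact List.mem_cons_self)
        have hvd0 : v < d0 := lt_of_le_of_ne (hvle d0 hd0mem) (Ne.symm hd0ne)
        rw [hdcases] at hvmem
        rcases List.mem_cons.mp hvmem with h | h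
        · exact hd0ne h.symm
        · have : d0 ≤ v := by
            rw [hdcases] at hdpw
            exact (List.pairwise_cons.mp hdpw).1 v h
          omega
    -- count facts
    have hcount_t : t.count v = t.length := List.count_eq_length.mpr (fun b hb => ((htv b hb).symm ▸ rfl))
    have hcount_d : d.count v = 0 := List.count_eq_zero.mpr hvd
    have hcv : (v :: rest).count v = 1 + t.length := by
      rw [← hrest]
      simp [List.count_append, hcount_t, hcount_d]
      omega
    -- set fact: ofList (v :: rest) = v :: ofList d
    have hofl : PySem.Set.ofList (v :: rest) = v :: PySem.Set.ofList d := by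
      rw [PySem.Set.ofList_cons]
      congr 1
      -- (ofList rest).discard v = ofList d
      have haux : ∀ (t' : List Int), (∀ x ∈ t', x = v) →
          (PySem.Set.ofList (t' ++ d)).filter (fun y => !(y == v)) =
          (PySem.Set.ofList d).filter (fun y => !(y == v)) := by
        intro t'
        induction t' with
        | nil => intro _; rfl
        | cons a t'' ih2 =>
          intro hall
          have hav : a = v := hall a List.mem_cons_self
          subst hav
          rw [List.cons_append, PySem.Set.ofList_cons]
          show ((a :: (PySem.Set.ofList (t'' ++ d)).discard a).filter (fun y => !(y == a))) = _
          simp only [PySem.Set.discard, List.filter_cons]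
          rw [List.filter_filter]
          simp only [beq_self_eq_true, Bool.not_true, Bool.false_eq_true, if_false]
          rw [show (fun y => !(y == a) && !(y == a)) = (fun y => !(y == a)) from by funext y; simp [Bool.and_self]]
          exact ih2 (fun x hx => hall x (List.mem_cons_of_mem _ hx))
      have hdself : (PySem.Set.ofList d).filter (fun y => !(y == v)) = PySem.Set.ofList d := by
        apply List.filter_eq_self.mpr
        intro x hx
        have hxd : x ∈ d := (PySem.Set.mem_ofList d x).mp hx
        have hxv : x ≠ v := fun h => hvd (h ▸ hxd)
        simp [hxv]
      show (PySem.Set.ofList rest).discard v = _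
      simp only [PySem.Set.discard]
      rw [← hrest] at *
      rw [haux t htv, hdself]
    -- now assemble
    rw [pvRuns, hofl]
    simp only [List.map_cons]
    congr 1
    · rw [← ht]
      congr 1
      rw [hcv]
      push_cast
      ring
    · rw [ih hdpw]
      apply List.map_congr_left
      intro k hk
      have hkd : k ∈ d := (PySem.Set.mem_ofList d k).mp hk
      have hkv : k ≠ v := fun h => hvd (h ▸ hkd)
      congr 1
      rw [← hrest]
      simp [List.count_append, Ne.symm hkv,
        List.count_eq_zero.mpr (fun hmem => hkv (htv k hmem))]

-- the heart: both pair lists agree, for ANY list of counts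
theorem pvPairs_eq (lens : List Int) :
    PySem.List.sorted2 (PySem.Dict.counter lens).items Prod.fst Prod.snd
      = pvRuns (PySem.List.sorted lens (fun x => x)) := by
  set s := PySem.List.sorted lens (fun x => x) with hsdef
  have hperm : s.Perm lens := PySem.List.sorted_perm lens (fun x => x) false
  have hspw : s.Pairwise (· ≤ ·) := by
    have := PySem.List.sorted_pairwise lens (fun x => x)
    simpa using this
  -- LHS
  rw [PySem.Dict.items_counter, pvSorted2_map (fun k => (List.count k lens : Int)) _]
  -- RHS
  rw [pvRuns_sorted s hspw]
  -- the two sorted distinct lists coincide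
  have hsets : PySem.List.sorted (PySem.Set.ofList lens) (fun x => x) = PySem.Set.ofList s := by
    apply PySem.List.sorted_eq_of_perm_of_pairwise_lt
    · apply (List.perm_ext_iff_of_nodup (PySem.Set.nodup_ofList s) (PySem.Set.nodup_ofList lens)).mpr
      intro x
      rw [PySem.Set.mem_ofList, PySem.Set.mem_ofList]
      exact hperm.mem_iff
    · have hle : (PySem.Set.ofList s).Pairwise (· ≤ ·) := hspw.sublist (pvOfList_sublist s)
      have hnd : (PySem.Set.ofList s).Nodup := PySem.Set.nodup_ofList s
      have := hle.and hnd
      exact this.imp (fun {a b} h => lt_of_le_of_ne h.1 h.2)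
  rw [hsets]
  apply List.map_congr_left
  intro k _
  simp [hperm.count_eq]

-- ===== VERDICT (by name: the statement is the Claim_ definition above) =====
theorem generate_unique_count_xy_spec : Claim_equal_generate_unique_count_xy := by
  intro l _ _
  show _ = _
  unfold generate_unique_count_xy generate_unique_count_xy_alt
  simp only [pvDictFold_eq_counter, pvPairs_eq]
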